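-- pv_equiv track=rewrite | github.com/wenliangz/genesysv | utils/de_novo.py | is_denovo
-- ===== SOURCE A (Python) =====
-- def is_denovo(sample_array, father_id, mother_id, child_id):
--     looking_for_ids = (father_id, mother_id, child_id)
--     mother_gt = father_gt = child_gt = None
--     for ele in sample_array:
--
--         sample_id = ele.get('Sample_ID')
--
--         if sample_id not in looking_for_ids:
--             continue
--
--         if sample_id == father_id:
--             return None
--         elif sample_id == mother_id:
--             return None
--         elif sample_id == child_id:
--             child_gt = ele.get('GT')
--             if child_gt not in ['0/1', '0|1', '0|1']:
--                 None
--
--     return ('N/A', 'N/A', child_gt)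
-- ===== SOURCE B (Python) =====
-- def is_denovo(sample_array, father_id, mother_id, child_id):
--     # Pass 1: any parent sample present -> not a candidate at all.
--     parents = (father_id, mother_id)
--     if any(ele.get('Sample_ID') in parents for ele in sample_array):
--         return None
--     # Pass 2: extract the child's GT (last occurrence wins, default None).
--     child_gt = None
--     for ele in sample_array:
--         if ele.get('Sample_ID') == child_id:
--             child_gt = ele.get('GT')
--     return ('N/A', 'N/A', child_gt)
-- ===== Notes on version B (the rewrite author's own statement) =====
-- stated objective: alternative
-- what changed: Replaces A's single early-returning scan carrying genotype state with two independent passes: an any() parent-presence test, then a child-GT extraction loop (last occurrence wins).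
import Mathlib
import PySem

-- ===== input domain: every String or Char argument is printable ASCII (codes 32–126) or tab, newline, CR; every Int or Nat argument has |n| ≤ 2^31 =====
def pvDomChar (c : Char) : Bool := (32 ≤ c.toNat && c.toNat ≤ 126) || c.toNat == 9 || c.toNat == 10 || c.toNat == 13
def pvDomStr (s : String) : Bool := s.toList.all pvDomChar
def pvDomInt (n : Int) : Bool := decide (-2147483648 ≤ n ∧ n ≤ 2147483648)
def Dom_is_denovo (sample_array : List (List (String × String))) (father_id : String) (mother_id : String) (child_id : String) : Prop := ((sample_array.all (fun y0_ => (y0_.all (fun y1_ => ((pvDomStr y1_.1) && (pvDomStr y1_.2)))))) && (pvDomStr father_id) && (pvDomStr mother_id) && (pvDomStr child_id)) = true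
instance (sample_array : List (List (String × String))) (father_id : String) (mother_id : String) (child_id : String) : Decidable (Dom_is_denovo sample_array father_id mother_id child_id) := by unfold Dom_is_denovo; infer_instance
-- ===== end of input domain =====

-- ===== PORT A =====
def isDenovoLoop (father_id mother_id child_id : String) :
    List (List (String × String)) → Option String → Option (String × String × Option String)
  | [], child_gt => some ("N/A", "N/A", child_gt)
  | ele :: rest, child_gt =>
    let sample_id := (PySem.Dict.mk ele).get? "Sample_ID"
    if sample_id ≠ some father_id ∧ sample_id ≠ some mother_id ∧ sample_id ≠ some child_id then
      isDenovoLoop father_id mother_id child_id rest child_gt   -- continue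
    else if sample_id = some father_id then none
    else if sample_id = some mother_id then none
    else
      -- sample_id == child_id: record GT (the Python's `if child_gt not in [...]: None` is a no-op)
      isDenovoLoop father_id mother_id child_id rest ((PySem.Dict.mk ele).get? "GT")

def is_denovo (sample_array : List (List (String × String))) (father_id : String) (mother_id : String) (child_id : String) : Option (String × String × Option String) :=
  isDenovoLoop father_id mother_id child_id sample_array none

-- ===== PORT B =====
def is_denovo_alt (sample_array : List (List (String × String))) (father_id : String) (mother_id : String) (child_id : String) : Option (String × String × Option String) :=
  -- pass 1: any parent sample present?
  if sample_array.any (fun ele =>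
      (PySem.Dict.mk ele).get? "Sample_ID" == some father_id ||
      (PySem.Dict.mk ele).get? "Sample_ID" == some mother_id) then
    none
  else
    -- pass 2: last GT among the child's entries, default none
    some ("N/A", "N/A",
      (sample_array.filter (fun ele => (PySem.Dict.mk ele).get? "Sample_ID" == some child_id)).foldl
        (fun _ ele => (PySem.Dict.mk ele).get? "GT") none)

-- ===== PRECONDITION & SPEC =====
def Spec_is_denovo (sample_array : List (List (String × String))) (father_id : String) (mother_id : String) (child_id : String) (out : Option (String × String × Option String)) : Prop := out = is_denovo_alt sample_array father_id mother_id child_id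
instance (sample_array : List (List (String × String))) (father_id : String) (mother_id : String) (child_id : String) (out : Option (String × String × Option String)) : Decidable (Spec_is_denovo sample_array father_id mother_id child_id out) := by unfold Spec_is_denovo; infer_instance

-- ===== CLAIM (what is proved, stated in full; the proofs are below) =====
def Claim_equal_is_denovo : Prop := ∀ (sample_array : List (List (String × String))) (father_id : String) (mother_id : String) (child_id : String), Dom_is_denovo sample_array father_id mother_id child_id → Spec_is_denovo sample_array father_id mother_id child_id (is_denovo sample_array father_id mother_id child_id)

-- ===== LEMMAS AND PROOFS =====

-- ===== VERDICT (by name: the statement is the Claim_ definition above) =====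
lemma isDenovoLoop_eq (father_id mother_id child_id : String)
    (sa : List (List (String × String))) (cg : Option String) :
    isDenovoLoop father_id mother_id child_id sa cg =
      if sa.any (fun ele =>
          (PySem.Dict.mk ele).get? "Sample_ID" == some father_id ||
          (PySem.Dict.mk ele).get? "Sample_ID" == some mother_id) then
        none
      else
        some ("N/A", "N/A",
          (sa.filter (fun ele => (PySem.Dict.mk ele).get? "Sample_ID" == some child_id)).foldl
            (fun _ ele => (PySem.Dict.mk ele).get? "GT") cg) := by
  induction sa generalizing cg with
  | nil => simp [isDenovoLoop]
  | cons ele rest ih =>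
    simp only [isDenovoLoop, List.any_cons, List.filter_cons]
    by_cases hf : (PySem.Dict.mk ele).get? "Sample_ID" = some father_id
    · simp [hf]
    · by_cases hm : (PySem.Dict.mk ele).get? "Sample_ID" = some mother_id
      · simp [hm]
      · by_cases hc : (PySem.Dict.mk ele).get? "Sample_ID" = some child_id
        · have h1 : ¬ child_id = father_id := fun h => hf (h ▸ hc)
          have h2 : ¬ child_id = mother_id := fun h => hm (h ▸ hc)
          simp [hc, ih, List.foldl_cons, h1, h2]
        · simp [hf, hm, hc, ih]

theorem is_denovo_spec : Claim_equal_is_denovo := by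
  intro sa f m c _
  unfold Spec_is_denovo is_denovo is_denovo_alt
  exact isDenovoLoop_eq f m c sa none
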